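-- pv_equiv track=rewrite | github.com/Lewington-pitsos/remote-graphcast | app/statelist.py | _split_dates_into_days
-- ===== SOURCE A (Python) =====
-- def _split_dates_into_days(date_hours):
-- 	days = {}
-- 	for day, hours in date_hours.items():
-- 		k = str(".".join([str(h) for h in hours]))
-- 		if k not in days:
-- 			days[k] = []
-- 		days[k].append((day, hours))
--
-- 	segments = []
--
-- 	for k, v in days.items():
-- 		segment_data = []
-- 		for day, hours in v:
-- 			segment_data.append(day)
--
-- 		segments.append((segment_data, v[0][1]))
--
-- 	return segments
-- ===== SOURCE B (Python) =====
-- def _split_dates_into_days(date_hours):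
-- 	pending = list(date_hours.items())
-- 	segments = []
-- 	while pending:
-- 		day0, hours0 = pending[0]
-- 		k0 = ".".join(str(h) for h in hours0)
-- 		segments.append(([d for d, h in pending if ".".join(str(x) for x in h) == k0], hours0))
-- 		pending = [(d, h) for d, h in pending[1:] if ".".join(str(x) for x in h) != k0]
-- 	return segments
-- ===== Notes on version B (the rewrite author's own statement) =====
-- stated objective: alternative
-- what changed: B uses repeated partition refinement with no dictionary at all: it peels off the first remaining day's hour pattern, collects every day sharing it into one segment, removes them from the worklist and repeats, instead of A's dict-based grouping pass followed by a reformatting pass.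
import Mathlib
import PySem

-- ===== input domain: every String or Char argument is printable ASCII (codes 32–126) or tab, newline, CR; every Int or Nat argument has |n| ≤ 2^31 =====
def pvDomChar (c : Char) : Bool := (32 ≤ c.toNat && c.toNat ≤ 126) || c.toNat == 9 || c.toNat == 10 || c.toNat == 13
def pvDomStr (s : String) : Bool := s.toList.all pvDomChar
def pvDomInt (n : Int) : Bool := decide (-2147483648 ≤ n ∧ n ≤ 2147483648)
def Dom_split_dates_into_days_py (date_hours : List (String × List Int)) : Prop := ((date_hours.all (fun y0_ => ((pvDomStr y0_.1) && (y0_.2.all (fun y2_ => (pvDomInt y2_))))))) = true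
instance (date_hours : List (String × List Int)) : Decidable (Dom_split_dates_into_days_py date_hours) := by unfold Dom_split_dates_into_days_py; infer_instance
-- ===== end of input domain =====

-- B replaces A's dict-based grouping pass + reformatting pass by repeated partition refinement
-- with no dictionary: peel off the first remaining pattern, collect its days, drop them from the
-- worklist and repeat (objective: alternative algorithm, no speed claim).

-- ===== PORT A =====
-- k = str(".".join([str(h) for h in hours]))  (this key expression appears verbatim in both Pythons)
def pvKey (hours : List Int) : String :=
  PySem.Str.join "." (hours.map PySem.Int.toStr)

def split_dates_into_days_py (date_hours : List (String × List Int)) : List (List String × List Int) :=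
  let days : PySem.Dict String (List (String × List Int)) :=
    date_hours.foldl (fun d p => d.modify (pvKey p.2) [] (fun v => v ++ [p])) PySem.Dict.empty
  -- v[0][1]: every group v in days is nonempty by construction, so headD's default is never reached
  days.items.foldl (fun segments kv =>
    let segment_data := kv.2.foldl (fun sd p => sd ++ [p.1]) []
    segments ++ [(segment_data, (kv.2.headD ("", [])).2)]) []

-- ===== PORT B =====
-- the while loop of Source B: pending is the worklist, segments the output built so far
def pvLoopB (pending : List (String × List Int)) (segments : List (List String × List Int)) :
    List (List String × List Int) :=
  match pending with
  | [] => segments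
  | p :: rest =>
    let k0 := pvKey p.2
    let days := (List.filter (fun q => pvKey q.2 == k0) (p :: rest)).map Prod.fst
    pvLoopB (rest.filter (fun q => !(pvKey q.2 == k0))) (segments ++ [(days, p.2)])
termination_by pending.length
decreasing_by
  simp only [List.length_unattach]
  exact Nat.lt_succ_of_le (le_trans (List.length_filter_le _ _) (by simp))

def split_dates_into_days_py_alt (date_hours : List (String × List Int)) : List (List String × List Int) :=
  pvLoopB date_hours []

-- ===== PRECONDITION & SPEC =====
def Spec_split_dates_into_days_py (date_hours : List (String × List Int)) (out : List (List String × List Int)) : Prop := out = split_dates_into_days_py_alt date_hours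
instance (date_hours : List (String × List Int)) (out : List (List String × List Int)) : Decidable (Spec_split_dates_into_days_py date_hours out) := by unfold Spec_split_dates_into_days_py; infer_instance

-- ===== CLAIM (what is proved, stated in full; the proofs are below) =====
def Claim_equal_split_dates_into_days_py : Prop := ∀ (date_hours : List (String × List Int)), Dom_split_dates_into_days_py date_hours → Spec_split_dates_into_days_py date_hours (split_dates_into_days_py date_hours)

-- ===== LEMMAS AND PROOFS =====

-- strong induction on the length of a list (used for the partition-refinement recursions)
theorem pv_strong {α : Type} {motive : List α → Prop} (l : List α)
    (ind : ∀ l, (∀ m : List α, m.length < l.length → motive m) → motive l) : motive l :=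
  ind l (fun m _ => pv_strong m ind)
termination_by l.length
decreasing_by assumption

-- the filtered worklist is shorter than p :: rest
lemma pv_filter_lt {α : Type} (p : α) (rest : List α) (f : α → Bool) :
    (rest.filter f).length < (p :: rest).length :=
  Nat.lt_succ_of_le (List.length_filter_le _ _)

-- the grouping A's dict performs, written as head-first partition refinement
def pvGroups (l : List (String × List Int)) : List (String × List (String × List Int)) :=
  match l with
  | [] => []
  | p :: rest =>
    (pvKey p.2, List.filter (fun q => pvKey q.2 == pvKey p.2) (p :: rest)) ::
      pvGroups (rest.filter (fun q => !(pvKey q.2 == pvKey p.2)))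
termination_by l.length
decreasing_by
  simp only [List.length_unattach]
  exact Nat.lt_succ_of_le (le_trans (List.length_filter_le _ _) (by simp))

def pvSeg (kv : String × List (String × List Int)) : List String × List Int :=
  (kv.2.map Prod.fst, (kv.2.headD ("", [])).2)

def pvBuildA (l : List (String × List Int)) : PySem.Dict String (List (String × List Int)) :=
  l.foldl (fun d p => d.modify (pvKey p.2) [] (fun v => v ++ [p])) PySem.Dict.empty

-- membership among the group keys is membership among the element keys
lemma pv_mem_groups_keys (l : List (String × List Int)) (k : String) :
    k ∈ (pvGroups l).map Prod.fst ↔ k ∈ l.map (fun p => pvKey p.2) := by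
  induction l using pv_strong with
  | ind l ih =>
    cases l with
    | nil => rw [pvGroups]; simp
    | cons p rest =>
      rw [pvGroups]
      simp only [List.map_cons, List.mem_cons]
      rw [ih _ (pv_filter_lt p rest _)]
      constructor
      · rintro (h | h)
        · exact Or.inl h
        · obtain ⟨q, hq, hqk⟩ := List.mem_map.mp h
          exact Or.inr (List.mem_map.mpr ⟨q, (List.mem_filter.mp hq).1, hqk⟩)
      · rintro (h | h)
        · exact Or.inl h
        · obtain ⟨q, hq, hqk⟩ := List.mem_map.mp h
          by_cases hqp : pvKey q.2 = pvKey p.2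
          · exact Or.inl (hqk ▸ hqp)
          · exact Or.inr (List.mem_map.mpr
              ⟨q, List.mem_filter.mpr ⟨hq, by simp [hqp]⟩, hqk⟩)

lemma pv_groups_keys_nodup (l : List (String × List Int)) :
    ((pvGroups l).map Prod.fst).Nodup := by
  induction l using pv_strong with
  | ind l ih =>
    cases l with
    | nil => rw [pvGroups]; simp
    | cons p rest =>
      rw [pvGroups]
      simp only [List.map_cons, List.nodup_cons]
      refine ⟨?_, ih _ (pv_filter_lt p rest _)⟩
      intro hmem
      rw [pv_mem_groups_keys] at hmem
      obtain ⟨q, hq, hqk⟩ := List.mem_map.mp hmem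
      have := (List.mem_filter.mp hq).2
      simp [hqk] at this

-- the group a key names in pvGroups is the filter of the whole input by that key, and is nonempty
lemma pv_mem_groups_of_key (l : List (String × List Int)) (k : String)
    (v : List (String × List Int)) (hv : (k, v) ∈ pvGroups l) :
    v = l.filter (fun q => pvKey q.2 == k) ∧ v ≠ [] := by
  induction l using pv_strong with
  | ind l ih =>
    cases l with
    | nil => rw [pvGroups] at hv; simp at hv
    | cons p rest =>
      rw [pvGroups] at hv
      rcases List.mem_cons.mp hv with h | h
      · injection h with h1 h2
        subst h1
        subst h2
        refine ⟨rfl, ?_⟩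
        rw [List.filter_cons_of_pos (by simp)]
        simp
      · have hk_ne : k ≠ pvKey p.2 := by
          intro hkp
          have hmem : k ∈ (pvGroups (rest.filter (fun q => !(pvKey q.2 == pvKey p.2)))).map Prod.fst :=
            List.mem_map.mpr ⟨(k, v), h, rfl⟩
          rw [pv_mem_groups_keys] at hmem
          obtain ⟨q, hq, hqk⟩ := List.mem_map.mp hmem
          have := (List.mem_filter.mp hq).2
          simp [hqk, hkp] at this
        obtain ⟨h1, h2⟩ := ih _ (pv_filter_lt p rest _) h
        refine ⟨?_, h2⟩
        rw [h1, List.filter_filter]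
        rw [List.filter_cons_of_neg (by simp [Ne.symm hk_ne])]
        apply List.filter_congr
        intro q hq
        by_cases hqk : pvKey q.2 = k
        · simp [hqk, hk_ne]
        · simp [hqk]

-- appending one element to the input updates the groups the way one dict update does
lemma pv_groups_append (l : List (String × List Int)) (p : String × List Int) :
    pvGroups (l ++ [p]) =
      if pvKey p.2 ∈ (pvGroups l).map Prod.fst then
        (pvGroups l).map (fun q => if (q.1 == pvKey p.2) = true then (pvKey p.2, q.2 ++ [p]) else q)
      else pvGroups l ++ [(pvKey p.2, [p])] := by
  induction l using pv_strong with
  | ind l ih =>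
    cases l with
    | nil =>
      have h0 : pvGroups [] = [] := by rw [pvGroups]
      simp only [List.nil_append, h0]
      rw [pvGroups]
      simp [h0]
    | cons x rest =>
      have hxx : (pvKey x.2 == pvKey x.2) = true := by simp
      rw [List.cons_append, pvGroups, pvGroups]
      simp only [List.filter_cons, hxx, if_true, List.filter_append,
        List.map_cons, List.mem_cons]
      by_cases hpx : pvKey p.2 = pvKey x.2
      · have hp1 : (pvKey p.2 == pvKey x.2) = true := by simp [hpx]
        simp only [hp1, Bool.not_true, Bool.false_eq_true, if_true, if_false,
          List.filter_nil, List.append_nil]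
        rw [if_pos (Or.inl hpx)]
        -- the remaining groups have keys ≠ pvKey p.2, so the update map fixes them
        have hkeys : ∀ q ∈ pvGroups (rest.filter (fun q => !(pvKey q.2 == pvKey x.2))),
            ¬ ((q.1 == pvKey p.2) = true) := by
          intro q hq hqx
          have hmemk : q.1 ∈ (pvGroups (rest.filter (fun r => !(pvKey r.2 == pvKey x.2)))).map Prod.fst :=
            List.mem_map.mpr ⟨q, hq, rfl⟩
          rw [pv_mem_groups_keys] at hmemk
          obtain ⟨r, hr, hrk⟩ := List.mem_map.mp hmemk
          have := (List.mem_filter.mp hr).2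
          rw [hrk, eq_of_beq hqx, hpx] at this
          simp at this
        have hid : List.map (fun q => if (q.1 == pvKey p.2) = true then (pvKey p.2, q.2 ++ [p]) else q)
            (pvGroups (rest.filter (fun q => !(pvKey q.2 == pvKey x.2))))
            = pvGroups (rest.filter (fun q => !(pvKey q.2 == pvKey x.2))) := by
          have h1 : List.map (fun q => if (q.1 == pvKey p.2) = true then (pvKey p.2, q.2 ++ [p]) else q)
              (pvGroups (rest.filter (fun q => !(pvKey q.2 == pvKey x.2))))
              = List.map id (pvGroups (rest.filter (fun q => !(pvKey q.2 == pvKey x.2)))) :=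
            List.map_congr_left (fun q hq => by simp [hkeys q hq])
          rw [h1, List.map_id]
        rw [hid]
        congr 1
        simp [hpx]
      · have hp0 : (pvKey p.2 == pvKey x.2) = false := by simp [hpx]
        simp only [hp0, Bool.not_false, List.filter_nil, if_true, Bool.false_eq_true,
          if_false]
        rw [ih _ (pv_filter_lt x rest _)]
        by_cases hmem : pvKey p.2 ∈ (pvGroups (rest.filter (fun q => !(pvKey q.2 == pvKey x.2)))).map Prod.fst
        · rw [if_pos hmem, if_pos (Or.inr hmem)]
          rw [if_neg (by simp; exact fun h => hpx h.symm)]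
          simp
        · rw [if_neg hmem, if_neg (by rintro (h | h); exact hpx h; exact hmem h)]
          simp

-- A's dict holds exactly the partition-refinement groups, in the same order
lemma pv_buildA_items (l : List (String × List Int)) :
    (pvBuildA l).items = pvGroups l := by
  induction l using List.reverseRecOn with
  | nil => rw [pvGroups]; rfl
  | append_singleton l p ih =>
    have hstep : pvBuildA (l ++ [p])
        = (pvBuildA l).modify (pvKey p.2) [] (fun v => v ++ [p]) := by
      rw [pvBuildA, List.foldl_append, List.foldl_cons, List.foldl_nil]; rfl
    set d := pvBuildA l with hd
    set k := pvKey p.2 with hk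
    have hkeys : d.keys = (pvGroups l).map Prod.fst := by
      rw [PySem.Dict.keys, ih]
    rw [hstep, PySem.Dict.modify, pv_groups_append]
    by_cases hmem : k ∈ (pvGroups l).map Prod.fst
    · have hcont : d.contains k = true :=
        (PySem.Dict.contains_iff_mem_keys d k).mpr (hkeys ▸ hmem)
      have hgrp : (k, l.filter (fun q => pvKey q.2 == k)) ∈ d.items := by
        rw [ih]
        obtain ⟨q, hq, hqk⟩ := List.mem_map.mp hmem
        obtain ⟨h1, -⟩ := pv_mem_groups_of_key l q.1 q.2 (by cases q; exact hq)
        have : q = (k, l.filter (fun r => pvKey r.2 == k)) := by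
          cases q; simp at hqk h1 ⊢; subst hqk; exact ⟨rfl, h1⟩
        exact this ▸ hq
      have hnd : d.keys.Nodup := hkeys ▸ pv_groups_keys_nodup l
      have hgetD : d.getD k [] = l.filter (fun q => pvKey q.2 == k) :=
        PySem.Dict.getD_of_mem_items d hgrp hnd []
      rw [if_pos hmem, PySem.Dict.items_insert_of_contains d _ hcont, ih, hgetD]
      apply List.map_congr_left
      intro q hq
      by_cases hqk : (q.1 == k) = true
      · rw [if_pos hqk, if_pos hqk]
        obtain ⟨h1, -⟩ := pv_mem_groups_of_key l q.1 q.2 (by cases q; exact hq)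
        have hq1 : q.1 = k := eq_of_beq hqk
        rw [h1, hq1]
      · rw [if_neg hqk, if_neg hqk]
    · have hcont : d.contains k = false := by
        rw [← Bool.not_eq_true]
        intro h
        exact hmem (hkeys ▸ (PySem.Dict.contains_iff_mem_keys d k).mp h)
      rw [if_neg hmem, PySem.Dict.items_insert_of_not_contains d _ hcont, ih,
        PySem.Dict.getD_of_not_contains d [] hcont]
      simp [hk]

-- A's second pass is a map of pvSeg over the dict items
lemma pv_A_eq (l : List (String × List Int)) :
    split_dates_into_days_py l = ((pvBuildA l).items).map pvSeg := by
  simp only [split_dates_into_days_py, pvBuildA]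
  rw [PySem.List.foldl_append_singleton_eq_map
    (f := fun kv : String × List (String × List Int) =>
      ((kv.2.foldl (fun sd p => sd ++ [p.1]) []), (kv.2.headD ("", [])).2))]
  simp [pvSeg]
  have hflat : ∀ (b : List (String × List Int)),
      (b.map (fun x => [x.1])).flatten = b.map Prod.fst := by
    intro b
    induction b with
    | nil => simp
    | cons x t ih => simp [ih]
  intro a b _
  exact hflat b

-- B's loop emits exactly the pvSeg image of the partition-refinement groups
lemma pv_loopB_eq (pending : List (String × List Int)) :
    ∀ segments, pvLoopB pending segments = segments ++ (pvGroups pending).map pvSeg := by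
  induction pending using pv_strong with
  | ind pending ih =>
    cases pending with
    | nil => intro segments; rw [pvLoopB, pvGroups]; simp
    | cons p rest =>
      intro segments
      rw [pvLoopB, pvGroups, ih _ (pv_filter_lt p rest _)]
      simp only [List.map_cons, pvSeg]
      rw [List.filter_cons_of_pos (by simp)]
      simp

-- ===== VERDICT (by name: the statement is the Claim_ definition above) =====
theorem split_dates_into_days_py_spec : Claim_equal_split_dates_into_days_py := by
  intro date_hours _
  unfold Spec_split_dates_into_days_py split_dates_into_days_py_alt
  rw [pv_A_eq, pv_buildA_items, pv_loopB_eq]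
  simp
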